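-- pv_equiv track=rewrite | github.com/sarahpannn/ai-debate-engine | elo_analyzer.py | _determine_bull_bear_sides
-- ===== SOURCE A (Python) =====
-- from typing import Dict, List, Tuple
--
-- def _determine_bull_bear_sides(gov_persona: str, opp_persona: str, topic: str) -> Tuple[str, str]:
--     """Determine which persona is taking bull vs bear position based on names and topic"""
--
--     # Bull indicators (optimistic/pro-growth personas)
--     bull_indicators = ['bull', 'growth_bull', 'optimist', 'progressive', 'advocate']
--
--     # Bear indicators (skeptical/conservative personas)
--     bear_indicators = ['bear', 'skeptic', 'conservative', 'realist', 'neutral']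
--
--     gov_is_bull = any(indicator in gov_persona.lower() for indicator in bull_indicators)
--     gov_is_bear = any(indicator in gov_persona.lower() for indicator in bear_indicators)
--
--     opp_is_bull = any(indicator in opp_persona.lower() for indicator in bull_indicators)
--     opp_is_bear = any(indicator in opp_persona.lower() for indicator in bear_indicators)
--
--     # Return bull_side, bear_side
--     if gov_is_bull and opp_is_bear:
--         return gov_persona, opp_persona
--     elif gov_is_bear and opp_is_bull:
--         return opp_persona, gov_persona
--     elif gov_is_bull and not opp_is_bull:
--         return gov_persona, opp_persona
--     elif opp_is_bull and not gov_is_bull: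
--         return opp_persona, gov_persona
--     elif gov_is_bear and not opp_is_bear:
--         return opp_persona, gov_persona
--     elif opp_is_bear and not gov_is_bear:
--         return gov_persona, opp_persona
--     else:
--         # Fallback: use alphabetical ordering or return None
--         return None, None
-- ===== SOURCE B (Python) =====
-- BULL_INDICATORS = ['bull', 'growth_bull', 'optimist', 'progressive', 'advocate']
-- BEAR_INDICATORS = ['bear', 'skeptic', 'conservative', 'realist', 'neutral']
--
-- def _leaning(persona):
--     p = persona.lower()
--     bull = any(i in p for i in BULL_INDICATORS)
--     bear = any(i in p for i in BEAR_INDICATORS)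
--     return (2 if bull else 0) - (1 if bear else 0)
--
-- def _determine_bull_bear_sides(gov_persona, opp_persona, topic):
--     g = _leaning(gov_persona)
--     o = _leaning(opp_persona)
--     if g > o:
--         return gov_persona, opp_persona
--     if o > g:
--         return opp_persona, gov_persona
--     return None, None
-- ===== Notes on version B (the rewrite author's own statement) =====
-- stated objective: simpler
-- what changed: Replaces A's seven-branch boolean cascade with a per-persona leaning score (2*is_bull - is_bear) and a single comparison of the two scores.
-- intended difference: When BOTH personas contain both a bull and a bear indicator, A returns (gov_persona, opp_persona) by branch-order accident (it is not even symmetric under swapping the arguments), while B returns (None, None), the same tie answer it gives every other symmetric case, which is the intended behaviour for an undecidable matchup. — e.g. on _determine_bull_bear_sides("bullbear", "bullbear", ""): A returns (some "bullbear", some "bullbear"), B returns (none, none)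
import Mathlib
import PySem

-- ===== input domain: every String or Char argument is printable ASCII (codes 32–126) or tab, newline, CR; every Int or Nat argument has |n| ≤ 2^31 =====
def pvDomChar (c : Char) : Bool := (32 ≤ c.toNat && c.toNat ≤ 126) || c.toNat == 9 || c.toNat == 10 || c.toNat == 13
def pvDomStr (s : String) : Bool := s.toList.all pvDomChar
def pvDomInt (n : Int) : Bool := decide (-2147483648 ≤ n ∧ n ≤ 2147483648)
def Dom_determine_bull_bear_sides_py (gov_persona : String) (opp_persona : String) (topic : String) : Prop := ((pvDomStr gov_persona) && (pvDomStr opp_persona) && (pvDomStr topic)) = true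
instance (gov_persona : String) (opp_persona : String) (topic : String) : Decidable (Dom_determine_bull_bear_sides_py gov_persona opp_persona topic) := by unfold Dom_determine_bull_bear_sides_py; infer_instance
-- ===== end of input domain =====

-- B replaces A's seven-branch boolean cascade with a per-persona leaning score (2*bull - bear)
-- compared once (objective: simpler). A's fall-through value on the doubly-ambiguous corner is
-- stated as an intended difference D_ below.

def pvBullIndicators : List String := ["bull", "growth_bull", "optimist", "progressive", "advocate"]
def pvBearIndicators : List String := ["bear", "skeptic", "conservative", "realist", "neutral"]

-- persona matches some bull / bear indicator (Python: any(indicator in p.lower() for indicator in …))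
def pvHasBull (p : String) : Bool := pvBullIndicators.any (fun i => PySem.Str.isIn i (PySem.Str.lower p))
def pvHasBear (p : String) : Bool := pvBearIndicators.any (fun i => PySem.Str.isIn i (PySem.Str.lower p))

-- ===== PORT A =====
def determine_bull_bear_sides_py (gov_persona : String) (opp_persona : String) (topic : String) : Option String × Option String :=
  let gov_is_bull := pvHasBull gov_persona
  let gov_is_bear := pvHasBear gov_persona
  let opp_is_bull := pvHasBull opp_persona
  let opp_is_bear := pvHasBear opp_persona
  if gov_is_bull && opp_is_bear then (some gov_persona, some opp_persona)
  else if gov_is_bear && opp_is_bull then (some opp_persona, some gov_persona)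
  else if gov_is_bull && !opp_is_bull then (some gov_persona, some opp_persona)
  else if opp_is_bull && !gov_is_bull then (some opp_persona, some gov_persona)
  else if gov_is_bear && !opp_is_bear then (some opp_persona, some gov_persona)
  else if opp_is_bear && !gov_is_bear then (some gov_persona, some opp_persona)
  else (none, none)

-- ===== PORT B =====
def pvLeaning (p : String) : Int :=
  (if pvHasBull p then 2 else 0) - (if pvHasBear p then 1 else 0)

def determine_bull_bear_sides_py_alt (gov_persona : String) (opp_persona : String) (topic : String) : Option String × Option String :=
  let g := pvLeaning gov_persona
  let o := pvLeaning opp_persona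
  if g > o then (some gov_persona, some opp_persona)
  else if o > g then (some opp_persona, some gov_persona)
  else (none, none)

-- ===== PRECONDITION & SPEC =====
-- When BOTH personas contain both a bull and a bear indicator, A returns (gov_persona, opp_persona)
-- by branch-order accident (not symmetric under swapping the arguments), while B returns
-- (none, none) like every other symmetric tie, which is the intended answer for an undecidable matchup.
def D_determine_bull_bear_sides_py (gov_persona : String) (opp_persona : String) (topic : String) : Prop :=
  (pvHasBull gov_persona && pvHasBear gov_persona && pvHasBull opp_persona && pvHasBear opp_persona) = true
instance (gov_persona : String) (opp_persona : String) (topic : String) : Decidable (D_determine_bull_bear_sides_py gov_persona opp_persona topic) := by unfold D_determine_bull_bear_sides_py; infer_instance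

def Spec_determine_bull_bear_sides_py (gov_persona : String) (opp_persona : String) (topic : String) (out : Option String × Option String) : Prop := ¬ D_determine_bull_bear_sides_py gov_persona opp_persona topic → out = determine_bull_bear_sides_py_alt gov_persona opp_persona topic
instance (gov_persona : String) (opp_persona : String) (topic : String) (out : Option String × Option String) : Decidable (Spec_determine_bull_bear_sides_py gov_persona opp_persona topic out) := by unfold Spec_determine_bull_bear_sides_py; infer_instance

def pvDiffWitness_determine_bull_bear_sides_py : String × String × String := ("bullbear", "bullbear", "")
def pvDiffWitnessOut_determine_bull_bear_sides_py : (Option String × Option String) × (Option String × Option String) :=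
  ((some "bullbear", some "bullbear"), (none, none))

-- ===== CLAIM (what is proved, stated in full; the proofs are below) =====
def Claim_unchanged_determine_bull_bear_sides_py : Prop := ∀ (gov_persona : String) (opp_persona : String) (topic : String), Dom_determine_bull_bear_sides_py gov_persona opp_persona topic → Spec_determine_bull_bear_sides_py gov_persona opp_persona topic (determine_bull_bear_sides_py gov_persona opp_persona topic)
def Claim_changed_determine_bull_bear_sides_py : Prop := Dom_determine_bull_bear_sides_py (pvDiffWitness_determine_bull_bear_sides_py.1) (pvDiffWitness_determine_bull_bear_sides_py.2.1) (pvDiffWitness_determine_bull_bear_sides_py.2.2) ∧ D_determine_bull_bear_sides_py (pvDiffWitness_determine_bull_bear_sides_py.1) (pvDiffWitness_determine_bull_bear_sides_py.2.1) (pvDiffWitness_determine_bull_bear_sides_py.2.2) ∧ determine_bull_bear_sides_py (pvDiffWitness_determine_bull_bear_sides_py.1) (pvDiffWitness_determine_bull_bear_sides_py.2.1) (pvDiffWitness_determine_bull_bear_sides_py.2.2) = pvDiffWitnessOut_determine_bull_bear_sides_py.1 ∧ determine_bull_bear_sides_py_alt (pvDiffWitness_determine_bull_bear_sides_py.1) (pvDiffWitness_determine_bull_bear_sides_py.2.1)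 (pvDiffWitness_determine_bull_bear_sides_py.2.2) = pvDiffWitnessOut_determine_bull_bear_sides_py.2 ∧ pvDiffWitnessOut_determine_bull_bear_sides_py.1 ≠ pvDiffWitnessOut_determine_bull_bear_sides_py.2
def Claim_exact_determine_bull_bear_sides_py : Prop := ∀ (gov_persona : String) (opp_persona : String) (topic : String), Dom_determine_bull_bear_sides_py gov_persona opp_persona topic → D_determine_bull_bear_sides_py gov_persona opp_persona topic → determine_bull_bear_sides_py gov_persona opp_persona topic ≠ determine_bull_bear_sides_py_alt gov_persona opp_persona topic

-- ===== LEMMAS AND PROOFS =====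

-- ===== VERDICT (by name: the statement is the Claim_ definition above) =====
theorem determine_bull_bear_sides_py_spec : Claim_unchanged_determine_bull_bear_sides_py := by
  intro gov opp topic _ hD
  unfold D_determine_bull_bear_sides_py at hD
  unfold determine_bull_bear_sides_py determine_bull_bear_sides_py_alt pvLeaning
  by_cases h1 : pvHasBull gov <;> by_cases h2 : pvHasBear gov <;>
    by_cases h3 : pvHasBull opp <;> by_cases h4 : pvHasBear opp <;>
    simp [h1, h2, h3, h4] at hD ⊢

theorem determine_bull_bear_sides_py_changed : Claim_changed_determine_bull_bear_sides_py := by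
  unfold Claim_changed_determine_bull_bear_sides_py; decide

theorem determine_bull_bear_sides_py_tight : Claim_exact_determine_bull_bear_sides_py := by
  intro gov opp topic _ hD
  unfold D_determine_bull_bear_sides_py at hD
  simp only [Bool.and_eq_true] at hD
  obtain ⟨⟨⟨h1, h2⟩, h3⟩, h4⟩ := hD
  unfold determine_bull_bear_sides_py determine_bull_bear_sides_py_alt pvLeaning
  simp [h1, h2, h3, h4]
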